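-- pv_equiv track=rewrite | github.com/pride829/Class-NLP | nlp_week7/mapper.py | expander
-- ===== SOURCE A (Python) =====
-- def expander(words):
--     # expander expande the n-word pharse to a 2^n-1 set that contains all kind of combination except the one with all '-'
--     if len(words) == 1:
--         return [[words[0]], ['_']]
--
--     output = []
--     for w in expander(words[1:]):
--         output += [[words[0]] + w]
--         output += [['_'] + w]
--
--     return output
-- ===== SOURCE B (Python) =====
-- def expander(words):
--     n = len(words)
--     output = []
--     for m in range(1 << n):
--         output.append([words[j] if not ((m >> j) & 1) else '_' for j in range(n)])
--     return output
-- ===== Notes on version B (the rewrite author's own statement) =====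
-- stated objective: alternative
-- what changed: Replaces the recursion on the tail (interleaving word/underscore in front of each recursive row) by a single flat loop over all 2^n bitmasks, bit j of the mask deciding whether word j is kept or replaced by '_'.
import Mathlib
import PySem

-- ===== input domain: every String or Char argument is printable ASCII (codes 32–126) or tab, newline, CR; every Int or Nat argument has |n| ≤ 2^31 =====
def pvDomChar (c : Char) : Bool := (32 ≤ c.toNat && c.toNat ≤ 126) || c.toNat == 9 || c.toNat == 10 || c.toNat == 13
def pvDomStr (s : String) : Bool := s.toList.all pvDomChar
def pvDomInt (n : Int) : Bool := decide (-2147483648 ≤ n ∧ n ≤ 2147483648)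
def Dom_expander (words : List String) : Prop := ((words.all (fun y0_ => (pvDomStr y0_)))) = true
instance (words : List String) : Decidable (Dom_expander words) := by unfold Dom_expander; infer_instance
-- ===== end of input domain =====

-- B replaces A's tail recursion by one flat loop over all 2^n bitmasks (alternative decomposition);
-- return-value equivalence on nonempty lists (A infinitely recurses on []).

-- ===== PORT A =====
-- A: if len==1 return [[w0],['_']]; else fold over expander(tail), appending [w0]+w and ['_']+w.
def expander (words : List String) : List (List String) :=
  match words with
  | [] => []          -- A raises RecursionError here; excluded by Pre_expander
  | [w] => [[w], ["_"]]
  | w :: rest =>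
      (expander rest).foldl (fun output r => output ++ [[w] ++ r] ++ [["_"] ++ r]) []

-- ===== PORT B =====
-- B: for m in range(2^n), row j = words[j] if bit j of m is clear else '_'.
def expander_alt (words : List String) : List (List String) :=
  (List.range (2 ^ words.length)).map (fun m =>
    (List.range words.length).map (fun j =>
      if (m >>> j) % 2 = 0 then words.getD j "" else "_"))

-- ===== PRECONDITION & SPEC =====
-- Pre_ excludes only the empty list, on which Python A infinitely recurses (RecursionError).
def Pre_expander (words : List String) : Prop := words ≠ []
instance (words : List String) : Decidable (Pre_expander words) := by unfold Pre_expander; infer_instance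
def pvWitness_expander : List String := (["a", "b"])

def Spec_expander (words : List String) (out : List (List String)) : Prop := out = expander_alt words
instance (words : List String) (out : List (List String)) : Decidable (Spec_expander words out) := by unfold Spec_expander; infer_instance

-- ===== CLAIM (what is proved, stated in full; the proofs are below) =====
def Claim_equal_expander : Prop := ∀ (words : List String), Dom_expander words → Pre_expander words → Spec_expander words (expander words)

-- ===== LEMMAS AND PROOFS =====

-- A's foldl builds acc ++ flatMap
theorem expander_foldl (w : String) (l : List (List String)) (acc : List (List String)) :
    l.foldl (fun output r => output ++ [[w] ++ r] ++ [["_"] ++ r]) acc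
      = acc ++ l.flatMap (fun r => [w :: r, "_" :: r]) := by
  induction l generalizing acc with
  | nil => simp
  | cons r t ih => simp [List.foldl, ih, List.flatMap]

theorem pvRangeTwoMul (K : ℕ) :
    List.range (2 * K) = (List.range K).flatMap (fun k => [2 * k, 2 * k + 1]) := by
  induction K with
  | zero => simp
  | succ k ih =>
      have h : 2 * (k + 1) = (2 * k + 1) + 1 := by ring
      rw [h, List.range_succ, List.range_succ, List.range_succ, ih]
      simp

theorem shift_even (k j : ℕ) : (2 * k) >>> (j + 1) = k >>> j := by
  simp [Nat.shiftRight_eq_div_pow, pow_succ, Nat.mul_comm (2 ^ j) 2,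
    ← Nat.div_div_eq_div_mul, Nat.mul_div_cancel_left _ (by norm_num : (0:ℕ) < 2)]

theorem shift_odd (k j : ℕ) : (2 * k + 1) >>> (j + 1) = k >>> j := by
  have h : (2 * k + 1) / 2 = k := by omega
  simp [Nat.shiftRight_eq_div_pow, pow_succ, Nat.mul_comm (2 ^ j) 2,
    ← Nat.div_div_eq_div_mul, h]

theorem alt_cons (w : String) (rest : List String) :
    expander_alt (w :: rest) = (expander_alt rest).flatMap (fun r => [w :: r, "_" :: r]) := by
  unfold expander_alt
  have hK : (2 : ℕ) ^ (w :: rest).length = 2 * 2 ^ rest.length := by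
    simp [pow_succ, Nat.mul_comm]
  rw [hK, pvRangeTwoMul, List.map_flatMap, List.flatMap_map]
  refine List.flatMap_congr (fun k hk => ?_)
  simp only [List.length_cons, List.range_succ_eq_map, List.map_cons, List.map_map,
    List.cons.injEq, and_true]
  refine ⟨⟨?_, ?_⟩, ?_⟩
  · simp
  · simp [Function.comp, shift_even]
  · have h1 : (2 * k + 1) % 2 = 1 := by omega
    simp [h1, shift_odd]

theorem expander_eq_alt (words : List String) (h : words ≠ []) :
    expander words = expander_alt words := by
  induction words with
  | nil => exact absurd rfl h
  | cons w rest ih =>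
      match rest with
      | [] =>
          have h2 : List.range 2 = [0, 1] := rfl
          have h1 : List.range 1 = [0] := rfl
          simp [expander, expander_alt, h2, h1]
      | r :: t =>
          rw [alt_cons, ← ih (by simp)]
          show (expander (r :: t)).foldl _ [] = _
          rw [expander_foldl]
          simp

-- ===== VERDICT (by name: the statement is the Claim_ definition above) =====
theorem expander_spec : Claim_equal_expander := by
  intro words _ hpre
  exact expander_eq_alt words hpre
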